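-- pv_equiv track=rewrite | github.com/ksopyla/seq2seq-attention-pytorch-lightning | tokenize_utils.py | ngram_vocab_gen_iter
-- ===== SOURCE A (Python) =====
-- import itertools
--
-- def ngram_vocab_gen_iter(iterator, ngrams):
--     '''generates all ngrams with iterators
--     eg. bigrams [abcd]->ab, bc, cd, d
--     trigrams: s -> (s0,s1,s2), (s1,s2,s3), (s2, s3,4), ...
--     '''
--     iter_tuple = itertools.tee(iterator, ngrams)
--
--     nested_iter_next=0
--     list_of_iters = []
--     for i,one_iter in enumerate(iter_tuple):
--
--         for _ in range(nested_iter_next):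
--             next(one_iter,"")
--
--         list_of_iters.append(one_iter)
--         nested_iter_next+=1
--
--     for tup in zip(*list_of_iters):
--         yield "".join(tup)
-- ===== SOURCE B (Python) =====
-- def ngram_vocab_gen_iter(iterator, ngrams):
--     '''generates all ngrams with a single rolling window
--     eg. bigrams [abcd]->ab, bc, cd
--     '''
--     if ngrams <= 0:
--         return
--     window = []
--     for item in iterator:
--         window.append(item)
--         if len(window) > ngrams:
--             window.pop(0)
--         if len(window) == ngrams:
--             yield "".join(window)
-- ===== Notes on version B (the rewrite author's own statement) =====
-- stated objective: idiomatic
-- what changed: replaces the tee-into-ngrams-shifted-iterators-then-zip construction by a single pass that maintains one rolling window list of the last ngrams elements, yielding the join whenever the window is full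
import Mathlib
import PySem

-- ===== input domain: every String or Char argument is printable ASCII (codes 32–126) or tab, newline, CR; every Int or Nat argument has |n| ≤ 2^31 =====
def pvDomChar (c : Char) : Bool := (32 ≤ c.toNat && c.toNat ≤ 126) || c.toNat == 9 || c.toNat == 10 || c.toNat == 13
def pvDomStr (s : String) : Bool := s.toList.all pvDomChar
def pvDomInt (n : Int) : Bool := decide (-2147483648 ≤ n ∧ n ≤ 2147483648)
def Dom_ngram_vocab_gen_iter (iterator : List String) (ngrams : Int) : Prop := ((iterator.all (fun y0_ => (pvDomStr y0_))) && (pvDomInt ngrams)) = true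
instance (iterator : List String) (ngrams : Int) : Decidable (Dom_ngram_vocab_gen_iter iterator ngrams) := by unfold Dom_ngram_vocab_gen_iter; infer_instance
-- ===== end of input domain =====

-- B replaces A's tee-into-shifted-iterators-then-zip by one pass with a single rolling
-- window of the last `ngrams` elements (idiomatic; same output order and values).

-- ===== PORT A =====
-- the 'for tup in zip(*list_of_iters): yield "".join(tup)' loop; the fuel argument is
-- only a totality guard (zip yields at most as many tuples as the first iterator has)
def pvZipJoin : Nat → List (List String) → List String
  | 0, _ => []
  | _, [] => []
  | f+1, ls =>
    if ls.any List.isEmpty then []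
    else PySem.Str.join "" (ls.map (fun l => l.headD "")) :: pvZipJoin f (ls.map List.tail)

def ngram_vocab_gen_iter (iterator : List String) (ngrams : Int) : List String :=
  -- itertools.tee(iterator, ngrams): ngrams independent copies of the stream
  let iter_tuple := List.replicate ngrams.toNat iterator
  -- advance the i-th copy i times with next(one_iter, "") (= drop i, defaults past the end)
  let st := iter_tuple.foldl
    (fun (st : Nat × List (List String)) one_iter =>
      (st.1 + 1, st.2 ++ [one_iter.drop st.1])) (0, ([] : List (List String)))
  pvZipJoin (iterator.length + 1) st.2

-- ===== PORT B =====
def pvWindowStep (n : Nat) (st : List String × List String) (item : String) : List String × List String :=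
  let w := st.1 ++ [item]
  let w := if n < w.length then w.tail else w   -- window.pop(0)
  if w.length = n then (w, st.2 ++ [PySem.Str.join "" w]) else (w, st.2)

def ngram_vocab_gen_iter_alt (iterator : List String) (ngrams : Int) : List String :=
  if ngrams ≤ 0 then []
  else (iterator.foldl (pvWindowStep ngrams.toNat) ([], [])).2

-- ===== PRECONDITION & SPEC =====
-- Pre_ excludes only ngrams < 0, where Python A raises ValueError (itertools.tee).
def Pre_ngram_vocab_gen_iter (iterator : List String) (ngrams : Int) : Prop := 0 ≤ ngrams
instance (iterator : List String) (ngrams : Int) : Decidable (Pre_ngram_vocab_gen_iter iterator ngrams) := by unfold Pre_ngram_vocab_gen_iter; infer_instance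
def pvWitness_ngram_vocab_gen_iter : List String × Int := (["a", "b", "c"], 2)

def Spec_ngram_vocab_gen_iter (iterator : List String) (ngrams : Int) (out : List String) : Prop := out = ngram_vocab_gen_iter_alt iterator ngrams
instance (iterator : List String) (ngrams : Int) (out : List String) : Decidable (Spec_ngram_vocab_gen_iter iterator ngrams out) := by unfold Spec_ngram_vocab_gen_iter; infer_instance

-- ===== CLAIM (what is proved, stated in full; the proofs are below) =====
def Claim_equal_ngram_vocab_gen_iter : Prop := ∀ (iterator : List String) (ngrams : Int), Dom_ngram_vocab_gen_iter iterator ngrams → Pre_ngram_vocab_gen_iter iterator ngrams → Spec_ngram_vocab_gen_iter iterator ngrams (ngram_vocab_gen_iter iterator ngrams)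
-- ===== LEMMAS AND PROOFS =====
-- the consecutive length-n windows of l, front to back
def pvWindows (n : Nat) : List String → List (List String)
  | [] => []
  | x :: xs => if xs.length + 1 < n then [] else (x :: xs).take n :: pvWindows n xs

theorem pvWindows_of_short (n : Nat) (l : List String) (h : l.length < n) :
    pvWindows n l = [] := by
  cases l with
  | nil => rfl
  | cons x xs => simp only [pvWindows]; rw [if_pos]; simpa using h

theorem pvWindows_full (n : Nat) (w xs : List String) (hw : w.length = n) (hn : 1 ≤ n) :
    pvWindows n (w ++ xs) = w :: pvWindows n (w.tail ++ xs) := by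
  cases w with
  | nil => simp at hw; omega
  | cons y w' =>
    simp only [List.cons_append, pvWindows]
    rw [if_neg (by simp at hw ⊢; omega)]
    rw [show (y :: (w' ++ xs)) = (y :: w') ++ xs by simp, List.take_left' hw]
    simp

theorem pvFold_tee (it : List String) :
    ∀ (k c : Nat) (acc : List (List String)),
    (List.replicate k it).foldl
      (fun (st : Nat × List (List String)) one_iter =>
        (st.1 + 1, st.2 ++ [one_iter.drop st.1])) (c, acc)
      = (c + k, acc ++ (List.range' c k).map (it.drop ·)) := by
  intro k
  induction k with
  | zero => intro c acc; simp
  | succ k ih =>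
    intro c acc
    rw [List.replicate_succ, List.foldl_cons, ih, List.range'_succ]
    simp; omega

theorem pvZipJoin_drops :
    ∀ (f : Nat) (l : List String) (m : Nat), l.length < f →
    pvZipJoin f ((List.range (m+1)).map (fun i => l.drop i))
      = (pvWindows (m+1) l).map (PySem.Str.join "") := by
  intro f
  induction f with
  | zero => intro l m h; omega
  | succ f ih =>
    intro l m h
    have hne : (List.range (m+1)).map (fun i => l.drop i) ≠ [] := by simp
    obtain ⟨d, ds, hds⟩ := List.exists_cons_of_ne_nil hne
    rw [hds]
    simp only [pvZipJoin]
    rw [← hds]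
    have hany : (((List.range (m+1)).map (fun i => l.drop i)).any List.isEmpty = true)
        ↔ l.length < m + 1 := by
      simp only [List.any_map, List.any_eq_true, List.mem_range, Function.comp_def,
        List.isEmpty_iff, List.drop_eq_nil_iff]
      constructor
      · rintro ⟨i, hi, hle⟩; omega
      · intro hc; exact ⟨m, by omega, by omega⟩
    by_cases hc : l.length < m + 1
    · rw [if_pos (hany.mpr hc), pvWindows_of_short _ _ hc]; rfl
    · rw [Nat.not_lt] at hc
      rw [if_neg (fun hh => absurd (hany.mp hh) (by omega))]
      obtain ⟨x, xs, rfl⟩ : ∃ x xs, l = x :: xs := by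
        cases l with
        | nil => simp at hc
        | cons x xs => exact ⟨x, xs, rfl⟩
      have hheads : ((List.range (m+1)).map (fun i => (x :: xs).drop i)).map (fun l => l.headD "")
          = (x :: xs).take (m+1) := by
        apply List.ext_getElem
        · simp at hc ⊢; omega
        · intro i h1 h2
          simp only [List.getElem_map, List.getElem_range, List.getElem_take]
          have : i < (x :: xs).length := by simp at h1 h2 hc ⊢; omega
          rw [List.headD_eq_head?, List.head?_drop, List.getElem?_eq_getElem this]
          rfl
      have htails : ((List.range (m+1)).map (fun i => (x :: xs).drop i)).map List.tail
          = (List.range (m+1)).map (fun i => xs.drop i) := by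
        simp only [List.map_map]
        apply List.map_congr_left
        intro i _
        simp [List.tail_drop]
      rw [hheads, htails, ih xs m (by simp at h; omega)]
      simp only [pvWindows]
      rw [if_neg (by simp at hc ⊢; omega)]
      simp

theorem pvFold_window (n : Nat) (hn : 1 ≤ n) :
    ∀ (l w out : List String), w.length ≤ n →
    (l.foldl (pvWindowStep n) (w, out)).2
      = out ++ (pvWindows n (w.drop (w.length + 1 - n) ++ l)).map (PySem.Str.join "") := by
  intro l
  induction l with
  | nil =>
    intro w out hw
    have : (w.drop (w.length + 1 - n)).length < n := by
      simp only [List.length_drop]; omega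
    rw [List.foldl_nil, List.append_nil, pvWindows_of_short _ _ this]
    simp
  | cons x xs ih =>
    intro w out hw
    rw [List.foldl_cons]
    by_cases h : w.length + 1 ≤ n
    · -- no pop
      have hdrop0 : w.length + 1 - n = 0 := by omega
      have hstep1 : (w ++ [x]).length = w.length + 1 := by simp
      by_cases hfull : w.length + 1 = n
      · -- window becomes full: emit
        have : pvWindowStep n (w, out) x = (w ++ [x], out ++ [PySem.Str.join "" (w ++ [x])]) := by
          simp only [pvWindowStep]
          rw [show (if n < (w ++ [x]).length then (w ++ [x]).tail else w ++ [x]) = w ++ [x]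
              from if_neg (by simp; omega)]
          rw [if_pos (by simp; omega)]
        rw [this, ih _ _ (by simp; omega)]
        rw [hdrop0, List.drop_zero]
        have : w ++ x :: xs = (w ++ [x]) ++ xs := by simp
        rw [this, pvWindows_full n (w ++ [x]) xs (by simpa using hfull) hn]
        have : (w ++ [x]).length + 1 - n = 1 := by simp; omega
        rw [this, List.drop_one]
        simp
      · -- window still short: no emit
        have : pvWindowStep n (w, out) x = (w ++ [x], out) := by
          simp only [pvWindowStep]
          rw [show (if n < (w ++ [x]).length then (w ++ [x]).tail else w ++ [x]) = w ++ [x]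
              from if_neg (by simp; omega)]
          rw [if_neg (by simp; omega)]
        rw [this, ih _ _ (by simp; omega)]
        rw [hdrop0, List.drop_zero]
        have : (w ++ [x]).length + 1 - n = 0 := by simp; omega
        rw [this, List.drop_zero]
        simp
    · -- w.length = n: pop front, emit
      have hwn : w.length = n := by omega
      have hstep1 : (w ++ [x]).length = w.length + 1 := by simp
      have htl : (w ++ [x]).tail = w.tail ++ [x] := by
        cases w with
        | nil => simp at hwn; omega
        | cons y w' => simp
      have : pvWindowStep n (w, out) x
          = (w.tail ++ [x], out ++ [PySem.Str.join "" (w.tail ++ [x])]) := by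
        simp only [pvWindowStep]
        rw [show (if n < (w ++ [x]).length then (w ++ [x]).tail else w ++ [x]) = w.tail ++ [x] by
              rw [if_pos (by simp; omega), htl]]
        rw [if_pos (by cases w with | nil => simp at hwn; omega | cons y w' => simp at hwn ⊢; omega)]
      rw [this, ih _ _ (by cases w with | nil => simp at hwn; omega | cons y w' => simp at hwn ⊢; omega)]
      have hd1 : w.length + 1 - n = 1 := by omega
      rw [hd1, List.drop_one]
      have : w.tail ++ x :: xs = (w.tail ++ [x]) ++ xs := by simp
      rw [this, pvWindows_full n (w.tail ++ [x]) xs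
        (by cases w with | nil => simp at hwn; omega | cons y w' => simp at hwn ⊢; omega) hn]
      have : (w.tail ++ [x]).length + 1 - n = 1 := by
        cases w with | nil => simp at hwn; omega | cons y w' => simp at hwn ⊢; omega
      rw [this, List.drop_one]
      simp

-- ===== VERDICT (by name: the statement is the Claim_ definition above) =====
theorem ngram_vocab_gen_iter_spec : Claim_equal_ngram_vocab_gen_iter := by
  intro iterator ngrams _ hpre
  unfold Spec_ngram_vocab_gen_iter ngram_vocab_gen_iter ngram_vocab_gen_iter_alt
  by_cases h0 : ngrams ≤ 0
  · have : ngrams.toNat = 0 := by omega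
    rw [if_pos h0, this]
    rfl
  · rw [if_neg h0]
    have hn : 1 ≤ ngrams.toNat := by omega
    obtain ⟨m, hm⟩ : ∃ m, ngrams.toNat = m + 1 := ⟨ngrams.toNat - 1, by omega⟩
    simp only [hm]
    rw [pvFold_tee, List.nil_append]
    rw [← List.range_eq_range']
    rw [pvZipJoin_drops (iterator.length + 1) iterator m (by omega)]
    rw [pvFold_window (m+1) (by omega) iterator [] []
      (by simp)]
    simp
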